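-- pv_equiv track=rewrite | github.com/IvanPerez9/Programming-Paradigms | Python/Repaso/Tema1/RepasoSet.py | tuplaPares
-- ===== SOURCE A (Python) =====
-- def tuplaPares (conjunto):
--     pares = set()
--     impares= set()
--     for e in conjunto:
--         if e % 2 == 0:
--             pares.add(e)
--         else:
--             impares.add(e)
--     return pares,impares # Ojo como devolver la tupla
-- ===== SOURCE B (Python) =====
-- def tuplaPares(conjunto):
--     # Divide and conquer: recursively partition each half, merge with set union.
--     def go(xs):
--         if len(xs) == 0:
--             return set(), set()
--         if len(xs) == 1:
--             e = xs[0]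
--             return ({e}, set()) if e % 2 == 0 else (set(), {e})
--         m = len(xs) // 2
--         p1, i1 = go(xs[:m])
--         p2, i2 = go(xs[m:])
--         return p1 | p2, i1 | i2
--     return go(list(conjunto))
-- ===== Notes on version B (the rewrite author's own statement) =====
-- stated objective: alternative
-- what changed: A classifies every element into two accumulator sets in one left-to-right loop; B is a divide-and-conquer recursion that partitions each half of the list independently and merges the half-results with set unions.
import Mathlib
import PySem

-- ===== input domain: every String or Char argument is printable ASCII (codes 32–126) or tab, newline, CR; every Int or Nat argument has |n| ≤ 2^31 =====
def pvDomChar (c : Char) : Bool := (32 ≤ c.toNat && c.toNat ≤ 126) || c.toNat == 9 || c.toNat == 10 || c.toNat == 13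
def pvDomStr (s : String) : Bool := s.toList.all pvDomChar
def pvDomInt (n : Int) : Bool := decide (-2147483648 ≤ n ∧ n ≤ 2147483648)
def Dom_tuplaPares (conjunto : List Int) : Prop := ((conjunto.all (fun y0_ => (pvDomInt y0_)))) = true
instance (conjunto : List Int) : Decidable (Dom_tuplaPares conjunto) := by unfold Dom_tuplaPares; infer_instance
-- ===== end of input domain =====

-- B replaces A's single classifying loop by a divide-and-conquer recursion: each half of the list is
-- partitioned independently and the half-results are merged with set unions (objective: alternative).

-- ===== PORT A =====
def tuplaPares (conjunto : List Int) : List Int × List Int :=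
  conjunto.foldl
    (fun (st : PySem.Set Int × PySem.Set Int) e =>
      if PySem.Int.mod e 2 == 0 then (PySem.Set.add st.1 e, st.2)
      else (st.1, PySem.Set.add st.2 e))
    (PySem.Set.empty, PySem.Set.empty)

-- ===== PORT B =====
-- inner helper 'go' of Source B: xs[:m] / xs[m:] on 0 ≤ m ≤ len are List.take / List.drop
def pvGoTP (xs : List Int) : PySem.Set Int × PySem.Set Int :=
  match xs with
  | [] => (PySem.Set.empty, PySem.Set.empty)
  | [e] =>
    if PySem.Int.mod e 2 == 0 then (PySem.Set.add PySem.Set.empty e, PySem.Set.empty)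
    else (PySem.Set.empty, PySem.Set.add PySem.Set.empty e)
  | x :: y :: rest =>
    let m := (x :: y :: rest).length / 2
    let r1 := pvGoTP ((x :: y :: rest).take m)
    let r2 := pvGoTP ((x :: y :: rest).drop m)
    (PySem.Set.union r1.1 r2.1, PySem.Set.union r1.2 r2.2)
termination_by xs.length
decreasing_by
  · simp; omega
  · simp; omega

def tuplaPares_alt (conjunto : List Int) : List Int × List Int :=
  pvGoTP conjunto

-- ===== PRECONDITION & SPEC =====
def Spec_tuplaPares (conjunto : List Int) (out : List Int × List Int) : Prop := out = tuplaPares_alt conjunto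
instance (conjunto : List Int) (out : List Int × List Int) : Decidable (Spec_tuplaPares conjunto out) := by unfold Spec_tuplaPares; infer_instance

-- ===== CLAIM (what is proved, stated in full; the proofs are below) =====
def Claim_equal_tuplaPares : Prop := ∀ (conjunto : List Int), Dom_tuplaPares conjunto → Spec_tuplaPares conjunto (tuplaPares conjunto)

-- ===== LEMMAS AND PROOFS =====

-- A's loop with two independent set accumulators splits into two deduplicating passes over the filtered lists.
theorem tuplaPares_foldl_split (ev : Int → Bool) (l : List Int) (p i : PySem.Set Int) :
    l.foldl
      (fun (st : PySem.Set Int × PySem.Set Int) e =>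
        if ev e then (PySem.Set.add st.1 e, st.2)
        else (st.1, PySem.Set.add st.2 e)) (p, i)
    = (PySem.Set.update p (l.filter ev),
       PySem.Set.update i (l.filter (fun e => !(ev e)))) := by
  induction l generalizing p i with
  | nil => rfl
  | cons e l ih =>
    by_cases h : ev e <;>
      simp [h, ih, PySem.Set.update]

-- updating with an already-deduplicated list adds the same elements
theorem update_ofList_right (s b : List Int) :
    PySem.Set.update s (PySem.Set.ofList b) = PySem.Set.update s b := by
  rw [PySem.Set.update_eq_append_filter, PySem.Set.update_eq_append_filter,
    PySem.Set.ofList_ofList]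

-- set union of the two deduplicated halves is the deduplication of the concatenation
theorem union_ofList_ofList (a b : List Int) :
    PySem.Set.union (PySem.Set.ofList a) (PySem.Set.ofList b) = PySem.Set.ofList (a ++ b) := by
  show PySem.Set.update (PySem.Set.ofList a) (PySem.Set.ofList b) = _
  rw [update_ofList_right, PySem.Set.ofList_append]

-- the divide-and-conquer helper computes the deduplicated evens and odds of its argument
theorem pvGoTP_eq (xs : List Int) :
    pvGoTP xs = (PySem.Set.ofList (xs.filter (fun e => PySem.Int.mod e 2 == 0)),
                 PySem.Set.ofList (xs.filter (fun e => !(PySem.Int.mod e 2 == 0)))) := by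
  fun_induction pvGoTP xs with
  | case1 => rfl
  | case2 e h =>
    simp only [List.filter_cons, List.filter_nil, h, Bool.not_true, Bool.false_eq_true,
      if_true, if_false]
    rfl
  | case3 e h =>
    have hf : (PySem.Int.mod e 2 == 0) = false := by simpa using h
    simp only [List.filter_cons, List.filter_nil, hf, Bool.not_false, Bool.false_eq_true,
      if_true, if_false]
    rfl
  | case4 x y rest m r1 r2 ih1 ih2 =>
    rw [show r1 = _ from ih1, show r2 = _ from ih2]
    simp only [union_ofList_ofList, ← List.filter_append, List.take_append_drop]

-- ===== VERDICT (by name: the statement is the Claim_ definition above) =====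
theorem tuplaPares_spec : Claim_equal_tuplaPares := by
  intro conjunto _
  unfold Spec_tuplaPares tuplaPares tuplaPares_alt
  rw [tuplaPares_foldl_split (fun e => PySem.Int.mod e 2 == 0), pvGoTP_eq]
  rfl
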